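-- pv_equiv track=rewrite | github.com/tyroneross/RossLabs-AI-Toolkit | archive/build-loop-auto-research/scripts/core.py | detect_phase
-- ===== SOURCE A (Python) =====
-- PHASE_MARKERS = {
--     "diagnose": [
--         "check",
--         "review",
--         "audit",
--         "assess",
--         "investigate",
--         "scan",
--         "look through",
--         "understand",
--     ],
--     "authorize": [
--         "go for it",
--         "do this",
--         "continue",
--         "implement",
--         "build this",
--         "proceed",
--         "ship it",
--     ],
--     "verify": [
--         "re-check",
--         "recheck",
--         "compare",
--         "verify",
--         "validate",
--         "check latest",
--         "audit again",
--         "test this",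
--     ],
--     "ship": [
--         "commit",
--         "push",
--         "branch",
--         "deploy",
--         "release",
--         "merge",
--         "pr ",
--         "pull request",
--     ],
--     "handoff": [
--         "draft the plan",
--         "step by step",
--         "markdown",
--         "copy paste",
--         "handoff",
--         "summarize",
--         "what can you do vs what do i need to do",
--     ],
-- }
--
-- def detect_phase(text: str) -> str | None:
--     lowered = text.lower()
--     scores: dict[str, int] = {}
--     for phase, markers in PHASE_MARKERS.items():
--         matched = [marker for marker in markers if marker in lowered]
--         if matched:
--             scores[phase] = len(matched)
--     if not scores:
--         return None
--     return sorted(scores.items(), key=lambda item: (-item[1], item[0]))[0][0]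
-- ===== SOURCE B (Python) =====
-- PHASE_MARKERS = {
--     "diagnose": [
--         "check",
--         "review",
--         "audit",
--         "assess",
--         "investigate",
--         "scan",
--         "look through",
--         "understand",
--     ],
--     "authorize": [
--         "go for it",
--         "do this",
--         "continue",
--         "implement",
--         "build this",
--         "proceed",
--         "ship it",
--     ],
--     "verify": [
--         "re-check",
--         "recheck",
--         "compare",
--         "verify",
--         "validate",
--         "check latest",
--         "audit again",
--         "test this",
--     ],
--     "ship": [
--         "commit",
--         "push",
--         "branch",
--         "deploy",
--         "release",
--         "merge",
--         "pr ",
--         "pull request",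
--     ],
--     "handoff": [
--         "draft the plan",
--         "step by step",
--         "markdown",
--         "copy paste",
--         "handoff",
--         "summarize",
--         "what can you do vs what do i need to do",
--     ],
-- }
--
--
-- def detect_phase(text):
--     lowered = text.lower()
--     best_phase = None
--     best_count = 0
--     for phase, markers in PHASE_MARKERS.items():
--         count = sum(1 for marker in markers if marker in lowered)
--         if count and (best_phase is None or count > best_count
--                       or (count == best_count and phase < best_phase)):
--             best_phase, best_count = phase, count
--     return best_phase
-- ===== Notes on version B (the rewrite author's own statement) =====
-- stated objective: simpler
-- what changed: B replaces A's score-dict plus full sort of the score table by a single pass over PHASE_MARKERS that keeps a running best (phase, count) with the same (-count, alphabetical) tie-break, returning None when no marker matched.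
import Mathlib
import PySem

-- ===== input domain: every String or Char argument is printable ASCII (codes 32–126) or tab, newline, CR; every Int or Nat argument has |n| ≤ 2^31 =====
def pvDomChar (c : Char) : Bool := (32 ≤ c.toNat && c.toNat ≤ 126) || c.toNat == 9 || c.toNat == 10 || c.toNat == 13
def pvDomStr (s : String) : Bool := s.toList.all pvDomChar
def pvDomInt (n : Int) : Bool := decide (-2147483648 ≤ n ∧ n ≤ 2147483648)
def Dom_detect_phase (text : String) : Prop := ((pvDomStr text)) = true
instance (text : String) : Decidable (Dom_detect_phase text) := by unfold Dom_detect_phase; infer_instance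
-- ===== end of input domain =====

-- B replaces A's score-dict plus sort of the whole score table by a one-pass running-best scan (objective: simpler).

-- the module constant PHASE_MARKERS, shared by both programs
def pvPhaseMarkers : List (String × List String) :=
  [("diagnose", ["check", "review", "audit", "assess", "investigate", "scan", "look through", "understand"]),
   ("authorize", ["go for it", "do this", "continue", "implement", "build this", "proceed", "ship it"]),
   ("verify", ["re-check", "recheck", "compare", "verify", "validate", "check latest", "audit again", "test this"]),
   ("ship", ["commit", "push", "branch", "deploy", "release", "merge", "pr ", "pull request"]),
   ("handoff", ["draft the plan", "step by step", "markdown", "copy paste", "handoff", "summarize", "what can you do vs what do i need to do"])]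

-- ===== PORT A =====
def detect_phase (text : String) : Option String :=
  let lowered := PySem.Str.lower text
  let scores : PySem.Dict String Int :=
    pvPhaseMarkers.foldl (fun d pm =>
      let matched := pm.2.filter (fun marker => PySem.Str.isIn marker lowered)
      if matched = [] then d else d.insert pm.1 (matched.length : Int))
      PySem.Dict.empty
  if scores.items = [] then none
  else
    -- sorted(scores.items(), key=lambda item: (-item[1], item[0]))[0][0]; the [0] index is guarded nonempty
    match PySem.List.pyGet? (PySem.List.sorted2 scores.items (fun it => -it.2) (fun it => it.1)) 0 with
    | some it => some it.1
    | none => none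

-- ===== PORT B =====
def detect_phase_alt (text : String) : Option String :=
  let lowered := PySem.Str.lower text
  let best : Option (String × Int) :=
    pvPhaseMarkers.foldl (fun best pm =>
      let count : Int := (pm.2.countP (fun marker => PySem.Str.isIn marker lowered) : Int)
      if count ≠ 0 then
        match best with
        | none => some (pm.1, count)
        | some (bp, bc) =>
          if count > bc ∨ (count = bc ∧ pm.1 < bp) then some (pm.1, count) else some (bp, bc)
      else best) none
  best.map Prod.fst

-- ===== PRECONDITION & SPEC =====
def Spec_detect_phase (text : String) (out : Option String) : Prop := out = detect_phase_alt text
instance (text : String) (out : Option String) : Decidable (Spec_detect_phase text out) := by unfold Spec_detect_phase; infer_instance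

-- ===== CLAIM (what is proved, stated in full; the proofs are below) =====
def Claim_equal_detect_phase : Prop := ∀ (text : String), Dom_detect_phase text → Spec_detect_phase text (detect_phase text)

-- ===== LEMMAS AND PROOFS =====

-- A's per-phase dict update, as a named step (definitionally A's loop body)
def pvStepA (d : PySem.Dict String Int) (n : String) (m : List String) : PySem.Dict String Int :=
  if m = [] then d else d.insert n (m.length : Int)

-- the strict comparison sorted2 uses with A's key (-count, name)
def pvLt (a b : String × Int) : Bool :=
  decide (-a.2 < -b.2) || (!decide (-b.2 < -a.2) && decide (a.1 < b.1))

-- running minimum step: first element with minimal key wins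
def pvMin (before : (String × Int) → (String × Int) → Bool)
    (m : Option (String × Int)) (x : String × Int) : Option (String × Int) :=
  match m with
  | none => some x
  | some y => if before x y then some x else some y

-- the (phase, count) entry a phase contributes when it has matches
def pvE (n : String) (m : List String) : List (String × Int) :=
  if m = [] then [] else [(n, (m.length : Int))]

def pvL (m1 m2 m3 m4 m5 : List String) : List (String × Int) :=
  pvE "diagnose" m1 ++ pvE "authorize" m2 ++ pvE "verify" m3 ++ pvE "ship" m4 ++ pvE "handoff" m5

lemma pv_head_insertBy (before : (String × Int) → (String × Int) → Bool) (x : String × Int)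
    (s : List (String × Int)) :
    (PySem.List.insertBy before x s).head? = pvMin before s.head? x := by
  cases s with
  | nil => rfl
  | cons y ys =>
    simp only [PySem.List.insertBy, pvMin, List.head?_cons]
    split <;> rfl

lemma pv_head_foldl (before : (String × Int) → (String × Int) → Bool)
    (l : List (String × Int)) (acc : List (String × Int)) :
    (l.foldl (fun a x => PySem.List.insertBy before x a) acc).head?
      = l.foldl (pvMin before) acc.head? := by
  induction l generalizing acc with
  | nil => rfl
  | cons x t ih => simp only [List.foldl_cons]; rw [ih, pv_head_insertBy]

lemma pv_head_sorted2 (l : List (String × Int)) :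
    (PySem.List.sorted2 l (fun it => -it.2) (fun it => it.1)).head?
      = l.foldl (pvMin pvLt) none := by
  exact pv_head_foldl pvLt l []

lemma pv_get0 (l : List (String × Int)) : PySem.List.pyGet? l 0 = l.head? := by
  cases l <;> simp [PySem.List.pyGet?, PySem.List.pyIdx?]

lemma pv_contains_step (d : PySem.Dict String Int) (n k : String) (m : List String)
    (h : (pvStepA d n m).contains k = true) : k = n ∨ d.contains k = true := by
  unfold pvStepA at h
  split at h
  · exact Or.inr h
  · rw [PySem.Dict.contains_insert] at h
    rcases Bool.or_eq_true_iff.mp h with h' | h'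
    · exact Or.inl (by simpa using h')
    · exact Or.inr h'

lemma pv_items_step (d : PySem.Dict String Int) (n : String) (m : List String)
    (h : d.contains n = false) :
    (pvStepA d n m).items = d.items ++ pvE n m := by
  unfold pvStepA pvE
  split
  · simp
  · rw [PySem.Dict.items_insert_of_not_contains d _ h]

lemma pv_foldl_E (a : Option (String × Int)) (n : String) (m : List String) :
    List.foldl (pvMin pvLt) a (pvE n m) = if m = [] then a else pvMin pvLt a (n, (m.length : Int)) := by
  unfold pvE; split <;> rfl

-- B's loop body in running-minimum form
lemma pv_stepB_min (best : Option (String × Int)) (n : String) (m : List String) :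
    (if ((m.length : Int) ≠ 0) then
       match best with
       | none => some (n, (m.length : Int))
       | some (bp, bc) =>
         if (m.length : Int) > bc ∨ ((m.length : Int) = bc ∧ n < bp) then some (n, (m.length : Int))
         else some (bp, bc)
     else best)
      = if m = [] then best else pvMin pvLt best (n, (m.length : Int)) := by
  by_cases hm : m = []
  · subst hm; simp
  · have hl : ((m.length : Int) ≠ 0) := by
      simpa using (List.length_eq_zero_iff.not.mpr hm)
    rw [if_pos hl, if_neg hm]
    cases best with
    | none => rfl
    | some y =>
      obtain ⟨bp, bc⟩ := y
      have hiff : (pvLt (n, (m.length : Int)) (bp, bc) = true)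
          ↔ ((m.length : Int) > bc ∨ ((m.length : Int) = bc ∧ n < bp)) := by
        simp only [pvLt, Bool.or_eq_true, Bool.and_eq_true, Bool.not_eq_eq_eq_not,
          Bool.not_true, decide_eq_true_eq, decide_eq_false_iff_not]
        constructor
        · rintro (h | ⟨h1, h2⟩)
          · left; omega
          · rcases lt_or_eq_of_le (by omega : bc ≤ (m.length : Int)) with h' | h'
            · left; omega
            · right; exact ⟨h'.symm, h2⟩
        · rintro (h | ⟨h1, h2⟩)
          · left; omega
          · right; exact ⟨by omega, h2⟩
      simp only [pvMin, hiff]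

-- the score dict's items, as the filtered (phase, count) table
lemma pv_scores_items (m1 m2 m3 m4 m5 : List String) :
    (pvStepA (pvStepA (pvStepA (pvStepA (pvStepA PySem.Dict.empty "diagnose" m1)
        "authorize" m2) "verify" m3) "ship" m4) "handoff" m5).items
      = pvL m1 m2 m3 m4 m5 := by
  set d1 := pvStepA PySem.Dict.empty "diagnose" m1 with hd1
  set d2 := pvStepA d1 "authorize" m2 with hd2
  set d3 := pvStepA d2 "verify" m3 with hd3
  set d4 := pvStepA d3 "ship" m4 with hd4
  have hc1 : ∀ k, d1.contains k = true → k = "diagnose" := by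
    intro k h
    rcases pv_contains_step _ _ _ _ h with h' | h'
    · exact h'
    · rw [PySem.Dict.contains_empty] at h'; exact absurd h' (by simp)
  have hc2 : ∀ k, d2.contains k = true → k = "authorize" ∨ k = "diagnose" := by
    intro k h
    rcases pv_contains_step _ _ _ _ h with h' | h'
    · exact Or.inl h'
    · exact Or.inr (hc1 k h')
  have hc3 : ∀ k, d3.contains k = true → k = "verify" ∨ k = "authorize" ∨ k = "diagnose" := by
    intro k h
    rcases pv_contains_step _ _ _ _ h with h' | h'
    · exact Or.inl h'
    · exact Or.inr (hc2 k h')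
  have hc4 : ∀ k, d4.contains k = true → k = "ship" ∨ k = "verify" ∨ k = "authorize" ∨ k = "diagnose" := by
    intro k h
    rcases pv_contains_step _ _ _ _ h with h' | h'
    · exact Or.inl h'
    · exact Or.inr (hc3 k h')
  have hf1 : d1.contains "authorize" = false := by
    cases h : d1.contains "authorize"
    · rfl
    · exact absurd (hc1 _ h) (by decide)
  have hf2 : d2.contains "verify" = false := by
    cases h : d2.contains "verify"
    · rfl
    · exact absurd (hc2 _ h) (by decide)
  have hf3 : d3.contains "ship" = false := by
    cases h : d3.contains "ship"
    · rfl
    · exact absurd (hc3 _ h) (by decide)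
  have hf4 : d4.contains "handoff" = false := by
    cases h : d4.contains "handoff"
    · rfl
    · exact absurd (hc4 _ h) (by decide)
  rw [pv_items_step _ _ _ hf4, hd4, pv_items_step _ _ _ hf3, hd3,
    pv_items_step _ _ _ hf2, hd2, pv_items_step _ _ _ hf1, hd1,
    pv_items_step _ _ _ (by simp [PySem.Dict.contains_empty])]
  simp [pvL, show (PySem.Dict.empty : PySem.Dict String Int).items = [] from rfl]

-- the match A performs on the guarded head is Option.map
lemma pv_match_map (o : Option (String × Int)) :
    (match o with | some it => some it.1 | none => none) = o.map Prod.fst := by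
  cases o <;> rfl

lemma pv_main (m1 m2 m3 m4 m5 : List String) :
    (let scores := pvStepA (pvStepA (pvStepA (pvStepA (pvStepA PySem.Dict.empty "diagnose" m1)
        "authorize" m2) "verify" m3) "ship" m4) "handoff" m5
     if scores.items = [] then none
     else
       match PySem.List.pyGet? (PySem.List.sorted2 scores.items (fun it => -it.2) (fun it => it.1)) 0 with
       | some it => some it.1
       | none => none)
      = ((pvL m1 m2 m3 m4 m5).foldl (pvMin pvLt) none).map Prod.fst := by
  simp only [pv_scores_items]
  by_cases h : pvL m1 m2 m3 m4 m5 = []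
  · rw [if_pos h, h]; rfl
  · rw [if_neg h, pv_get0, pv_head_sorted2, pv_match_map]

-- B's side, reduced to the running minimum over the filtered score table
lemma pv_B_red (text : String) :
    detect_phase_alt text
      = ((pvL
          (["check", "review", "audit", "assess", "investigate", "scan", "look through", "understand"].filter
            (fun marker => PySem.Str.isIn marker (PySem.Str.lower text)))
          (["go for it", "do this", "continue", "implement", "build this", "proceed", "ship it"].filter
            (fun marker => PySem.Str.isIn marker (PySem.Str.lower text)))
          (["re-check", "recheck", "compare", "verify", "validate", "check latest", "audit again", "test this"].filter
            (fun marker => PySem.Str.isIn marker (PySem.Str.lower text)))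
          (["commit", "push", "branch", "deploy", "release", "merge", "pr ", "pull request"].filter
            (fun marker => PySem.Str.isIn marker (PySem.Str.lower text)))
          (["draft the plan", "step by step", "markdown", "copy paste", "handoff", "summarize", "what can you do vs what do i need to do"].filter
            (fun marker => PySem.Str.isIn marker (PySem.Str.lower text)))).foldl
            (pvMin pvLt) none).map Prod.fst := by
  simp only [detect_phase_alt, pvPhaseMarkers, List.foldl_cons, List.foldl_nil,
    List.countP_eq_length_filter, pvL, List.foldl_append]
  simp only [pv_foldl_E]
  simp only [← pv_stepB_min]

-- ===== VERDICT (by name: the statement is the Claim_ definition above) =====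
set_option maxHeartbeats 1600000 in
theorem detect_phase_spec : Claim_equal_detect_phase := by
  intro text _
  unfold Spec_detect_phase
  exact (pv_main _ _ _ _ _).trans (pv_B_red text).symm
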